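-- pv_equiv track=rewrite | github.com/larryfang/eng-dashboard | backend/services/jira_report_service.py | _fallback_pulse
-- ===== SOURCE A (Python) =====
-- from collections import defaultdict
-- from typing import Any, Dict, List, Optional, Union
--
-- def _fallback_pulse(team: str, issues: List[Dict]) -> str:
--     """Generate a simple fallback pulse when LLM is unavailable."""
--     by_person: Dict[str, Dict[str, int]] = defaultdict(lambda: defaultdict(int))
--     for item in issues:
--         by_person[item["assignee"]][item["status"]] += 1
--
--     parts = []
--     for person, statuses in sorted(by_person.items()):
--         status_parts = [f"{count} {status}" for status, count in statuses.items()]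
--         parts.append(f"{person}: {', '.join(status_parts)}")
--     return ". ".join(parts) + "."
-- ===== SOURCE B (Python) =====
-- def _fallback_pulse(team, issues):
--     """Fallback pulse: outer loop over sorted distinct assignees, inner scan counting statuses."""
--     people = sorted({item["assignee"] for item in issues})
--     parts = []
--     for person in people:
--         counts = {}
--         for item in issues:
--             if item["assignee"] == person:
--                 counts[item["status"]] = counts.get(item["status"], 0) + 1
--         status_parts = [f"{count} {status}" for status, count in counts.items()]
--         parts.append(f"{person}: {', '.join(status_parts)}")
--     return ". ".join(parts) + "."
-- ===== Notes on version B (the rewrite author's own statement) =====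
-- stated objective: alternative
-- what changed: Replaces A's single-pass nested defaultdict grouping followed by an item sort with an outer loop over the sorted distinct assignees that re-scans the issue list per person, counting statuses into a plain dict.
import Mathlib
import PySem

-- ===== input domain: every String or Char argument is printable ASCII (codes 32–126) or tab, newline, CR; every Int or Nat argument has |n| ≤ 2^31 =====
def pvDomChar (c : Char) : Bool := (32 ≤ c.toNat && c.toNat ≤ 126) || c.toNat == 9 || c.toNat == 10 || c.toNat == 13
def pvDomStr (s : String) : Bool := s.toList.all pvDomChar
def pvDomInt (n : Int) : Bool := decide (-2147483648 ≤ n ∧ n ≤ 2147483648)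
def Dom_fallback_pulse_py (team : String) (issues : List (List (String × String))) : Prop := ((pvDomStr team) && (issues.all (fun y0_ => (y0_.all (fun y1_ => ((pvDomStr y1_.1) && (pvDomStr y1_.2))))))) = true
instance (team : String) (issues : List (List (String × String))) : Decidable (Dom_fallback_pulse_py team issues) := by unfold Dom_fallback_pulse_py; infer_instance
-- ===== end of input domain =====

-- B changes the decomposition (outer loop over sorted distinct assignees with a per-person counting scan,
-- instead of A's one-pass nested-defaultdict grouping); return value proved identical on Pre_.

-- ===== PORT A =====
-- item[k] for an issue dict; inside Pre_ the key is present, so the "" default is never used.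
def pvItemGet (item : List (String × String)) (k : String) : String :=
  (PySem.Dict.mk item).getD k ""

def fallback_pulse_py (team : String) (issues : List (List (String × String))) : String :=
  let by_person : PySem.Dict String (PySem.Dict String Int) :=
    issues.foldl (fun d item =>
      d.modify (pvItemGet item "assignee") PySem.Dict.empty
        (fun inner => inner.modify (pvItemGet item "status") 0 (· + 1))) PySem.Dict.empty
  -- sorted(by_person.items()): keys are distinct, so Python's tuple comparison only ever reads the key
  let parts : List String :=
    (PySem.List.sorted by_person.items (fun p => p.1) false).foldl
      (fun acc ps =>
        acc ++ [ps.1 ++ ": " ++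
          PySem.Str.join ", " (ps.2.items.map (fun sc => PySem.Int.toStr sc.2 ++ " " ++ sc.1))]) []
  PySem.Str.join ". " parts ++ "."

-- ===== PORT B =====
def fallback_pulse_py_alt (team : String) (issues : List (List (String × String))) : String :=
  let people : List String :=
    PySem.List.sorted (PySem.Set.ofList (issues.map (fun item => pvItemGet item "assignee")))
      (fun x => x) false
  let parts : List String :=
    people.map (fun person =>
      let counts : PySem.Dict String Int :=
        issues.foldl (fun c item =>
          if pvItemGet item "assignee" == person then
            c.insert (pvItemGet item "status") (c.getD (pvItemGet item "status") 0 + 1)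
          else c) PySem.Dict.empty
      person ++ ": " ++
        PySem.Str.join ", " (counts.items.map (fun sc => PySem.Int.toStr sc.2 ++ " " ++ sc.1)))
  PySem.Str.join ". " parts ++ "."

-- ===== PRECONDITION & SPEC =====
-- Pre_ excludes exactly the issues lacking an "assignee" or "status" key, on which A raises KeyError.
def Pre_fallback_pulse_py (team : String) (issues : List (List (String × String))) : Prop :=
  issues.all (fun item =>
    ((PySem.Dict.mk item).get? "assignee").isSome && ((PySem.Dict.mk item).get? "status").isSome) = true
instance (team : String) (issues : List (List (String × String))) : Decidable (Pre_fallback_pulse_py team issues) := by unfold Pre_fallback_pulse_py; infer_instance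

def pvWitness_fallback_pulse_py : String × (List (List (String × String))) :=
  ("t", [[("assignee", "bo"), ("status", "open")], [("assignee", "al"), ("status", "done")],
         [("assignee", "bo"), ("status", "open")]])

def Spec_fallback_pulse_py (team : String) (issues : List (List (String × String))) (out : String) : Prop := out = fallback_pulse_py_alt team issues
instance (team : String) (issues : List (List (String × String))) (out : String) : Decidable (Spec_fallback_pulse_py team issues out) := by unfold Spec_fallback_pulse_py; infer_instance

-- ===== CLAIM (what is proved, stated in full; the proofs are below) =====
def Claim_equal_fallback_pulse_py : Prop := ∀ (team : String) (issues : List (List (String × String))), Dom_fallback_pulse_py team issues → Pre_fallback_pulse_py team issues → Spec_fallback_pulse_py team issues (fallback_pulse_py team issues)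

-- ===== LEMMAS AND PROOFS =====

-- A's grouping dict, looked up at one person, is the status-modify fold over that person's issues.
theorem pvA_getD (l : List (List (String × String)))
    (d : PySem.Dict String (PySem.Dict String Int)) (p : String) :
    (l.foldl (fun d item =>
        d.modify (pvItemGet item "assignee") PySem.Dict.empty
          (fun inner => inner.modify (pvItemGet item "status") 0 (· + 1))) d).getD p PySem.Dict.empty
    = (l.filter (fun it => pvItemGet it "assignee" == p)).foldl
        (fun c it => c.modify (pvItemGet it "status") 0 (· + 1)) (d.getD p PySem.Dict.empty) := by
  induction l generalizing d with
  | nil => rfl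
  | cons it t ih =>
    simp only [List.foldl_cons, List.filter_cons]
    by_cases h : pvItemGet it "assignee" = p
    · simp [h, ih]
    · simp [h, Ne.symm h, ih, PySem.Dict.getD_modify]

-- Both per-person status dicts are Counter(statuses of that person's issues).
theorem pvCounts_eq (issues : List (List (String × String))) (p : String) :
    issues.foldl (fun (c : PySem.Dict String Int) item =>
        if pvItemGet item "assignee" == p then
          c.insert (pvItemGet item "status") (c.getD (pvItemGet item "status") 0 + 1)
        else c) PySem.Dict.empty
    = (issues.filter (fun it => pvItemGet it "assignee" == p)).foldl
        (fun c it => c.modify (pvItemGet it "status") 0 (· + 1)) PySem.Dict.empty := by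
  rw [PySem.List.foldl_if_eq_foldl_filter]
  rfl  -- d.insert s (d.getD s 0 + 1) is definitionally d.modify s 0 (· + 1)

theorem pvPairwise_lt {l : List String} (h1 : l.Pairwise (· ≤ ·)) (h2 : l.Nodup) :
    l.Pairwise (· < ·) :=
  (h1.and h2).imp (fun h => lt_of_le_of_ne h.1 h.2)

-- ===== VERDICT (by name: the statement is the Claim_ definition above) =====
theorem fallback_pulse_py_spec : Claim_equal_fallback_pulse_py := by
  intro team issues _ _
  unfold Spec_fallback_pulse_py fallback_pulse_py fallback_pulse_py_alt
  dsimp only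
  set bp : PySem.Dict String (PySem.Dict String Int) :=
    issues.foldl (fun d item =>
      d.modify (pvItemGet item "assignee") PySem.Dict.empty
        (fun inner => inner.modify (pvItemGet item "status") 0 (· + 1))) PySem.Dict.empty with hbp
  have hkeys : bp.keys = PySem.Set.ofList (issues.map (fun it => pvItemGet it "assignee")) := by
    rw [hbp, PySem.Dict.keys_foldl_modify_key]
    simp [PySem.Set.update, PySem.Set.ofList_eq_foldl]
  have hnd : bp.keys.Nodup := by
    rw [hbp]
    exact PySem.Dict.nodup_keys_foldl_modify_key _ _ _ _ _ PySem.Dict.nodup_keys_empty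
  have hitems : bp.items = bp.keys.map (fun k => (k, bp.getD k PySem.Dict.empty)) :=
    PySem.Dict.items_eq_map_keys bp hnd PySem.Dict.empty
  have hsorted : PySem.List.sorted bp.items (fun p => p.1) false
      = (PySem.List.sorted bp.keys (fun x => x) false).map (fun k => (k, bp.getD k PySem.Dict.empty)) := by
    apply PySem.List.sorted_eq_of_perm_of_pairwise_lt
    · rw [hitems]
      exact ((PySem.List.sorted_perm _ _ _).map _)
    · rw [List.pairwise_map]
      exact pvPairwise_lt (PySem.List.sorted_pairwise bp.keys (fun x => x))
        ((PySem.List.sorted_perm _ _ _).nodup_iff.mpr hnd)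
  rw [hsorted, PySem.List.foldl_append_singleton_eq_map, List.map_map, ← hkeys]
  simp only [List.nil_append]
  congr 2
  apply List.map_congr_left
  intro k hk
  have hv : bp.getD k PySem.Dict.empty
      = issues.foldl (fun c item =>
          if pvItemGet item "assignee" == k then
            c.insert (pvItemGet item "status") (c.getD (pvItemGet item "status") 0 + 1)
          else c) PySem.Dict.empty := by
    rw [hbp, pvA_getD, PySem.Dict.getD_empty]
    exact (pvCounts_eq issues k).symm
  simp [Function.comp, hv]
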